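-- pv_equiv track=rewrite | github.com/AaronShepp/AlphaPlot | AlphaPlot.py | compute_adjacency
-- ===== SOURCE A (Python) =====
-- NEIGHBOR_OFFSETS = [ # Define axial neighbor offsets
--     (+1, 0), (+1, -1), (0, -1),
--     (-1, 0), (-1, +1), (0, +1)
-- ]
--
-- def neighbors(coord):
--     q, r = coord
--     return [(q + dq, r + dr) for dq, dr in NEIGHBOR_OFFSETS]
--
-- def compute_adjacency(inner_coords, species_map, species_list):
--     counts = {
--         sp: {other: {n_neighbors: 0 for n_neighbors in range(7)} for other in species_list}
--         for sp in species_list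
--     }
--
--     for coord in inner_coords:
--         focal = species_map[coord]
--         neigh = [species_map[n] for n in neighbors(coord) if n in species_map]
--         for other in species_list:
--             counts[focal][other][neigh.count(other)] += 1
--
--     return counts
-- ===== SOURCE B (Python) =====
-- NEIGHBOR_OFFSETS = [ # Define axial neighbor offsets
--     (+1, 0), (+1, -1), (0, -1),
--     (-1, 0), (-1, +1), (0, +1)
-- ]
--
--
-- def compute_adjacency(inner_coords, species_map, species_list):
--     counts = {
--         sp: {other: {k: 0 for k in range(7)} for other in species_list}
--         for sp in species_list
--     }
--     totals = {sp: 0 for sp in species_list}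
--
--     for q, r in inner_coords:
--         focal = species_map[(q, r)]
--         row = counts[focal]
--         totals[focal] += 1
--         # frequency of each species among the in-grid neighbors of this cell
--         freq = {}
--         for dq, dr in NEIGHBOR_OFFSETS:
--             n = (q + dq, r + dr)
--             if n in species_map:
--                 sp = species_map[n]
--                 freq[sp] = freq.get(sp, 0) + 1
--         # bump only the observed (>=1) buckets of the observed species
--         for sp, k in freq.items():
--             if sp in row:
--                 row[sp][k] += 1
--
--     # the 0-bucket is complementary: cells with focal sp minus cells counted in buckets 1..6
--     for sp, row in counts.items():
--         t = totals[sp]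
--         for buckets in row.values():
--             buckets[0] = t - sum(buckets[k] for k in range(1, 7))
--
--     return counts
-- ===== Notes on version B (the rewrite author's own statement) =====
-- stated objective: faster
-- what changed: Instead of looping over every species of species_list for every focal cell, B makes one pass over inner_coords building a per-cell frequency dict of only the (at most 6) observed neighbor species, bumps only those >=1 buckets, tracks per-focal totals, and fills every 0-bucket afterwards by complementary counting (total minus the 1..6 buckets).
-- outside the precondition, e.g. on compute_adjacency([(0, 0)], {(0, 0): 'a'}, []): A returns {}, B raises KeyError
import Mathlib
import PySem

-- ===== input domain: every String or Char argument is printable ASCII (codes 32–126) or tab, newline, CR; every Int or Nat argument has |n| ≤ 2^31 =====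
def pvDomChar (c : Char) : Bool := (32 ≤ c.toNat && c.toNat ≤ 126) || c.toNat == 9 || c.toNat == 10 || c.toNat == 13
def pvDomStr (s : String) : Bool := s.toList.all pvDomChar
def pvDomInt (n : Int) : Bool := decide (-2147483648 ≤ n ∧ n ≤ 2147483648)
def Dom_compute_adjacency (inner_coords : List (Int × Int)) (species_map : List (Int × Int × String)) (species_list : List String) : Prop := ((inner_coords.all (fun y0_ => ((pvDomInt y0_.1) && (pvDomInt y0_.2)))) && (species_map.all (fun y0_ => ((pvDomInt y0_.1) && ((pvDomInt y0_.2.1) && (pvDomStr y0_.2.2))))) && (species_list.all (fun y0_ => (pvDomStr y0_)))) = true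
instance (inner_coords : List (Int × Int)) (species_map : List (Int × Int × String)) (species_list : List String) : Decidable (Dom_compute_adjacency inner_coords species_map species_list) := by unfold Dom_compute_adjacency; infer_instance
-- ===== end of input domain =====

-- B replaces A's per-cell loop over ALL species by a per-cell frequency dict of the ≤6 observed
-- neighbor species plus a complementary final pass for the 0-buckets (objective: faster).

-- ===== PORT A =====
-- shared helpers: both Pythons carry the same NEIGHBOR_OFFSETS constant; species_map is a dict
-- (association list, first match = lookup, per the type convention)
def pvOffsets : List (Int × Int) := [(1, 0), (1, -1), (0, -1), (-1, 0), (-1, 1), (0, 1)]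

def pvNeighbors (coord : Int × Int) : List (Int × Int) := pvOffsets.map (fun d => (coord.1 + d.1, coord.2 + d.2))

def pvLookup (species_map : List (Int × Int × String)) (c : Int × Int) : Option String :=
  (species_map.find? (fun e => (e.1, e.2.1) == c)).map (fun e => e.2.2)

-- counts = {sp: {other: {k: 0 for k in range(7)} for other in species_list} for sp in species_list}
def pvInitBuckets : PySem.Dict Int Int :=
  (PySem.List.pyRange 0 7 1).foldl (fun d k => d.insert k 0) PySem.Dict.empty

def pvInitRow (species_list : List String) : PySem.Dict String (PySem.Dict Int Int) :=
  species_list.foldl (fun d o => d.insert o pvInitBuckets) PySem.Dict.empty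

def pvInitCounts (species_list : List String) : PySem.Dict String (PySem.Dict String (PySem.Dict Int Int)) :=
  species_list.foldl (fun d sp => d.insert sp (pvInitRow species_list)) PySem.Dict.empty

-- A's loop body; species_map[coord] (KeyError) and counts[focal] (KeyError when the focal species
-- is not a counts key) are excluded by Pre_, so getD/modify-with-default are exact here
def pvStepA (species_map : List (Int × Int × String)) (species_list : List String)
    (counts : PySem.Dict String (PySem.Dict String (PySem.Dict Int Int))) (coord : Int × Int) :
    PySem.Dict String (PySem.Dict String (PySem.Dict Int Int)) :=
  let focal := (pvLookup species_map coord).getD ""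
  let neigh := (pvNeighbors coord).filterMap (pvLookup species_map)
  species_list.foldl (fun cts other =>
    cts.modify focal PySem.Dict.empty (fun row =>
      row.modify other PySem.Dict.empty (fun b =>
        b.modify ((neigh.count other : Int)) 0 (· + 1)))) counts

def compute_adjacency (inner_coords : List (Int × Int)) (species_map : List (Int × Int × String)) (species_list : List String) : List (String × List (String × List (Int × Int))) :=
  ((inner_coords.foldl (pvStepA species_map species_list) (pvInitCounts species_list)).items.map
    (fun p => (p.1, p.2.items.map (fun q => (q.1, q.2.items)))))

-- ===== PORT B =====
def pvInitTotals (species_list : List String) : PySem.Dict String Int :=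
  species_list.foldl (fun d sp => d.insert sp 0) PySem.Dict.empty

-- freq = {}; for dq, dr in NEIGHBOR_OFFSETS: if n in species_map: freq[sp] = freq.get(sp, 0) + 1
def pvFreq (species_map : List (Int × Int × String)) (coord : Int × Int) : PySem.Dict String Int :=
  pvOffsets.foldl (fun f d =>
    match pvLookup species_map (coord.1 + d.1, coord.2 + d.2) with
    | some sp => f.modify sp 0 (· + 1)
    | none => f) PySem.Dict.empty

-- for sp, k in freq.items(): if sp in row: row[sp][k] += 1   (row = counts[focal], mutation of the
-- nested dict modelled by modify at focal; counts[focal] KeyError excluded by Pre_)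
def pvBumpCounts (species_map : List (Int × Int × String))
    (counts : PySem.Dict String (PySem.Dict String (PySem.Dict Int Int))) (coord : Int × Int) :
    PySem.Dict String (PySem.Dict String (PySem.Dict Int Int)) :=
  let focal := (pvLookup species_map coord).getD ""
  (pvFreq species_map coord).items.foldl (fun cts p =>
    if (cts.getD focal PySem.Dict.empty).contains p.1 then
      cts.modify focal PySem.Dict.empty (fun row =>
        row.modify p.1 PySem.Dict.empty (fun b =>
          b.modify p.2 0 (· + 1)))
    else cts) counts

-- totals[focal] += 1
def pvBumpTotals (species_map : List (Int × Int × String))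
    (totals : PySem.Dict String Int) (coord : Int × Int) : PySem.Dict String Int :=
  totals.modify ((pvLookup species_map coord).getD "") 0 (· + 1)

-- the two independent mutations of one loop iteration
def pvStepB (species_map : List (Int × Int × String))
    (st : PySem.Dict String (PySem.Dict String (PySem.Dict Int Int)) × PySem.Dict String Int)
    (coord : Int × Int) :
    PySem.Dict String (PySem.Dict String (PySem.Dict Int Int)) × PySem.Dict String Int :=
  (pvBumpCounts species_map st.1 coord, pvBumpTotals species_map st.2 coord)

-- for sp, row in counts.items(): t = totals[sp]; for buckets in row.values():
--   buckets[0] = t - sum(buckets[k] for k in range(1, 7))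
def pvFinalize (totals : PySem.Dict String Int)
    (counts : PySem.Dict String (PySem.Dict String (PySem.Dict Int Int))) :
    PySem.Dict String (PySem.Dict String (PySem.Dict Int Int)) :=
  counts.items.foldl (fun cts p =>
    cts.modify p.1 PySem.Dict.empty (fun row =>
      row.items.foldl (fun r q =>
        r.modify q.1 PySem.Dict.empty (fun b =>
          b.insert 0 (totals.getD p.1 0 - ((PySem.List.pyRange 1 7 1).map (fun k => b.getD k 0)).sum)))
        row)) counts

def compute_adjacency_alt (inner_coords : List (Int × Int)) (species_map : List (Int × Int × String)) (species_list : List String) : List (String × List (String × List (Int × Int))) :=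
  let st := inner_coords.foldl (pvStepB species_map) (pvInitCounts species_list, pvInitTotals species_list)
  ((pvFinalize st.2 st.1).items.map
    (fun p => (p.1, p.2.items.map (fun q => (q.1, q.2.items)))))

-- ===== PRECONDITION & SPEC =====
-- Pre_ excludes (a) inputs with a cell of inner_coords missing from species_map or mapped to a
-- species outside species_list — A raises KeyError there, except that with an empty species_list
-- A's inner loop never touches counts[focal] and it returns the all-zero dict while B's
-- totals[focal] lookup raises; and (b) nonempty inner_coords with a duplicate-keyed species_list —
-- a duplicate-dict-key corner (the dicts deduplicate the keys while A's inner loop still visits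
-- every duplicate, scaling each bucket by the species' multiplicity).
def Pre_compute_adjacency (inner_coords : List (Int × Int)) (species_map : List (Int × Int × String)) (species_list : List String) : Prop :=
  (inner_coords = [] ∨ species_list.Nodup) ∧
    ∀ c ∈ inner_coords, ∃ sp ∈ species_list, pvLookup species_map c = some sp

instance (inner_coords : List (Int × Int)) (species_map : List (Int × Int × String)) (species_list : List String) : Decidable (Pre_compute_adjacency inner_coords species_map species_list) := by unfold Pre_compute_adjacency; infer_instance

def pvWitness_compute_adjacency : (List (Int × Int)) × (List (Int × Int × String)) × List String :=
  ([(0, 0)], [(0, 0, "a"), (1, 0, "b")], ["a", "b"])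

def Spec_compute_adjacency (inner_coords : List (Int × Int)) (species_map : List (Int × Int × String)) (species_list : List String) (out : List (String × List (String × List (Int × Int)))) : Prop := out = compute_adjacency_alt inner_coords species_map species_list
instance (inner_coords : List (Int × Int)) (species_map : List (Int × Int × String)) (species_list : List String) (out : List (String × List (String × List (Int × Int)))) : Decidable (Spec_compute_adjacency inner_coords species_map species_list out) := by unfold Spec_compute_adjacency; infer_instance

-- ===== CLAIM (what is proved, stated in full; the proofs are below) =====
def Claim_equal_compute_adjacency : Prop := ∀ (inner_coords : List (Int × Int)) (species_map : List (Int × Int × String)) (species_list : List String), Dom_compute_adjacency inner_coords species_map species_list → Pre_compute_adjacency inner_coords species_map species_list → Spec_compute_adjacency inner_coords species_map species_list (compute_adjacency inner_coords species_map species_list)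

-- ===== LEMMAS AND PROOFS =====

-- names and closed forms used only by the proofs
def pvFocal (m : List (Int × Int × String)) (c : Int × Int) : String := (pvLookup m c).getD ""
def pvNeigh (m : List (Int × Int × String)) (c : Int × Int) : List String := (pvNeighbors c).filterMap (pvLookup m)
def pvNc (m : List (Int × Int × String)) (c : Int × Int) (o : String) : Int := ((pvNeigh m c).count o : Int)
def pvK : List Int := PySem.List.pyRange 0 7 1
def getV (cts : PySem.Dict String (PySem.Dict String (PySem.Dict Int Int))) (sp o : String) (k : Int) : Int :=
  ((cts.getD sp PySem.Dict.empty).getD o PySem.Dict.empty).getD k 0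
def pvN (m : List (Int × Int × String)) (l : List (Int × Int)) (sp o : String) (k : Int) : Int :=
  (l.countP (fun c => pvFocal m c == sp && pvNc m c o == k) : Int)
def pvKeysOK (S : List String) (cts : PySem.Dict String (PySem.Dict String (PySem.Dict Int Int))) : Prop :=
  cts.keys = S ∧ ∀ sp ∈ S, (cts.getD sp PySem.Dict.empty).keys = S ∧
    ∀ o ∈ S, ((cts.getD sp PySem.Dict.empty).getD o PySem.Dict.empty).keys = pvK

theorem pv_getD_insertfold {κ ν : Type} [BEq κ] [LawfulBEq κ] [DecidableEq κ]
    (L : List κ) (v : κ → ν) (d : PySem.Dict κ ν) (y : κ) (d0 : ν) :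
    (L.foldl (fun d x => d.insert x (v x)) d).getD y d0 =
      if y ∈ L then v y else d.getD y d0 := by
  induction L generalizing d with
  | nil => simp
  | cons a L ih =>
    simp only [List.foldl_cons, ih, PySem.Dict.getD_insert, List.mem_cons]
    by_cases h1 : y ∈ L <;> by_cases h2 : y = a <;> simp [h1, h2]

theorem pv_foldl_modify_fixed {α ν : Type} (L : List α) (key : String) (d0 : ν) (g : α → ν → ν)
    (d : PySem.Dict String ν) (x : String) :
    (L.foldl (fun d a => d.modify key d0 (g a)) d).getD x d0 =
      if x = key then L.foldl (fun v a => g a v) (d.getD key d0) else d.getD x d0 := by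
  induction L generalizing d with
  | nil => by_cases h : x = key <;> simp [h]
  | cons a L ih =>
    simp only [List.foldl_cons, ih, PySem.Dict.getD_modify]
    by_cases h : x = key <;> simp [h]

theorem pv_visit_once {κ ν β : Type} [BEq κ] [LawfulBEq κ] [DecidableEq κ]
    (Q : List (κ × β)) (hnd : (Q.map (·.1)).Nodup) (g : κ → ν → ν) (d0 : ν)
    (r row : PySem.Dict κ ν) (hagree : ∀ x ∈ Q.map (·.1), r.getD x d0 = row.getD x d0) (o : κ) :
    (Q.foldl (fun r q => r.modify q.1 d0 (g q.1)) r).getD o d0 =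
      if o ∈ Q.map (·.1) then g o (row.getD o d0) else r.getD o d0 := by
  induction Q generalizing r with
  | nil => simp
  | cons q Q ih =>
    simp only [List.map_cons, List.nodup_cons] at hnd
    have hagree' : ∀ x ∈ Q.map (·.1), (r.modify q.1 d0 (g q.1)).getD x d0 = row.getD x d0 := by
      intro x hx
      have hne : x ≠ q.1 := fun h => hnd.1 (h ▸ hx)
      rw [PySem.Dict.getD_modify_of_ne _ _ _ hne]
      exact hagree x (by simp only [List.map_cons, List.mem_cons]; right; exact hx)
    simp only [List.foldl_cons]
    rw [ih hnd.2 _ hagree']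
    by_cases h1 : o ∈ Q.map (·.1)
    · simp [h1]
    · by_cases h2 : o = q.1
      · rw [if_neg h1, if_pos (by simp [h2]), h2, PySem.Dict.getD_modify]
        rw [if_pos rfl, hagree q.1 (by simp)]
      · rw [if_neg h1, if_neg (by simp [h2, h1]), PySem.Dict.getD_modify_of_ne _ _ _ h2]

theorem pv_sum_map_ind (K : List Int) (q : Int → Bool) :
    (K.map (fun k => if q k then 1 else 0)).sum = K.countP q := by
  induction K with
  | nil => simp
  | cons k K ih => simp [List.countP_cons, ih]; split_ifs <;> omega

theorem pv_sum_map_add_nat (K : List Int) (a b : Int → Nat) :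
    (K.map (fun k => a k + b k)).sum = (K.map a).sum + (K.map b).sum := by
  induction K with
  | nil => simp
  | cons k K ih => simp [ih]; omega

theorem pv_countP_partition (l : List (Int × Int)) (p : (Int × Int) → Bool)
    (h : (Int × Int) → Int) (K : List Int) (hK : K.Nodup) (hmem : ∀ c ∈ l, h c ∈ K) :
    l.countP p = (K.map (fun k => l.countP (fun c => p c && h c == k))).sum := by
  induction l with
  | nil => simp
  | cons c l ih =>
    have hmem' : ∀ x ∈ l, h x ∈ K := fun x hx => hmem x (by simp [hx])
    simp only [List.countP_cons]
    rw [show (fun k => l.countP (fun c => p c && h c == k) + if (p c && h c == k) = true then 1 else 0)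
        = (fun k => l.countP (fun c => p c && h c == k) + (fun k => if (p c && h c == k) = true then 1 else 0) k) from rfl,
      pv_sum_map_add_nat, ← ih hmem', pv_sum_map_ind]
    congr 1
    by_cases hp : p c = true
    · simp only [hp, Bool.true_and, if_pos]
      have h1 : K.countP (fun k => h c == k) = K.count (h c) := by
        unfold List.count
        exact List.countP_congr (fun x _ => by constructor <;> (intro hh; simp at hh ⊢; omega))
      rw [h1, List.count_eq_one_of_mem hK (hmem c (by simp))]
    · simp only [Bool.not_eq_true] at hp
      simp [hp]

-- rowfold: A's inner loop at the row level
theorem pv_rowfold (m : List (Int × Int × String)) (c : Int × Int) (L : List String)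
    (row : PySem.Dict String (PySem.Dict Int Int)) (o : String) (k : Int) :
    (((L.foldl (fun r other => r.modify other PySem.Dict.empty (fun b =>
        b.modify ((((pvNeighbors c).filterMap (pvLookup m)).count other : Int)) 0 (· + 1))) row).getD o PySem.Dict.empty).getD k 0)
      = ((row.getD o PySem.Dict.empty).getD k 0) + (if k = pvNc m c o then (L.count o : Int) else 0) := by
  induction L generalizing row with
  | nil => simp
  | cons a L ih =>
    simp only [List.foldl_cons, ih]
    by_cases h : o = a
    · subst h
      rw [PySem.Dict.getD_modify, if_pos rfl, PySem.Dict.getD_modify]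
      simp only [List.count_cons, BEq.rfl, if_true]
      have : pvNc m c o = (((pvNeighbors c).filterMap (pvLookup m)).count o : Int) := rfl
      rw [← this]
      by_cases hk : k = pvNc m c o
      · simp [hk]; ring
      · simp [hk]
    · rw [PySem.Dict.getD_modify_of_ne _ _ _ h]
      have : (a :: L).count o = L.count o := by
        simp [List.count_cons]; intro hh; exact absurd hh.symm h
      rw [this]

theorem pv_getV_stepA (m : List (Int × Int × String)) (S : List String) (c : Int × Int)
    (cts : PySem.Dict String (PySem.Dict String (PySem.Dict Int Int))) (sp o : String) (k : Int) :
    getV (pvStepA m S cts c) sp o k =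
      getV cts sp o k + (if sp = pvFocal m c ∧ k = pvNc m c o then (S.count o : Int) else 0) := by
  unfold getV pvStepA
  rw [pv_foldl_modify_fixed]
  by_cases h : sp = pvFocal m c
  · rw [if_pos (by exact h), pv_rowfold]
    subst h
    by_cases hk : k = pvNc m c o <;> simp [hk, pvFocal]
  · rw [if_neg (by exact h), if_neg (fun hh => h hh.1)]
    simp

theorem pv_getV_loopA (m : List (Int × Int × String)) (S : List String) (l : List (Int × Int))
    (cts : PySem.Dict String (PySem.Dict String (PySem.Dict Int Int))) (sp o : String) (k : Int) :
    getV (l.foldl (pvStepA m S) cts) sp o k =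
      getV cts sp o k + (S.count o : Int) * pvN m l sp o k := by
  induction l generalizing cts with
  | nil => simp [pvN]
  | cons c l ih =>
    simp only [List.foldl_cons, ih, pv_getV_stepA, pvN, List.countP_cons]
    by_cases hc : sp = pvFocal m c ∧ k = pvNc m c o
    · rw [if_pos hc, if_pos (by simp [beq_iff_eq]; exact ⟨hc.1.symm, hc.2.symm⟩)]
      push_cast; ring
    · rw [if_neg hc, if_neg (by simp [beq_iff_eq]; intro h1 h2; exact absurd ⟨h1.symm, h2.symm⟩ hc)]
      push_cast; ring

theorem pv_getD_initBuckets (k : Int) : pvInitBuckets.getD k 0 = 0 := by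
  unfold pvInitBuckets
  rw [pv_getD_insertfold]
  split_ifs <;> simp

theorem pv_getV_init (S : List String) (sp o : String) (k : Int) :
    getV (pvInitCounts S) sp o k = 0 := by
  unfold getV pvInitCounts
  rw [pv_getD_insertfold]
  split_ifs with h1
  · unfold pvInitRow
    rw [pv_getD_insertfold]
    split_ifs with h2
    · exact pv_getD_initBuckets k
    · simp
  · simp

theorem pv_keys_initBuckets : pvInitBuckets.keys = pvK := by decide

theorem pv_keys_initRow (S : List String) (hS : S.Nodup) : (pvInitRow S).keys = S := by
  unfold pvInitRow
  have := PySem.Dict.items_foldl_insert_fresh S (fun x => x) (fun _ => pvInitBuckets) PySem.Dict.empty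
    (by intro a _; exact PySem.Dict.contains_empty a) (by simpa using hS)
  simp only [PySem.Dict.keys, this]
  simp [PySem.Dict.empty, Function.comp_def]

theorem pv_keys_initCounts (S : List String) (hS : S.Nodup) : (pvInitCounts S).keys = S := by
  unfold pvInitCounts
  have := PySem.Dict.items_foldl_insert_fresh S (fun x => x) (fun _ => pvInitRow S) PySem.Dict.empty
    (by intro a _; exact PySem.Dict.contains_empty a) (by simpa using hS)
  simp only [PySem.Dict.keys, this]
  simp [PySem.Dict.empty, Function.comp_def]

theorem pv_keysOK_init (S : List String) (hS : S.Nodup) : pvKeysOK S (pvInitCounts S) := by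
  refine ⟨pv_keys_initCounts S hS, ?_⟩
  intro sp hsp
  unfold pvInitCounts
  rw [pv_getD_insertfold, if_pos hsp]
  refine ⟨pv_keys_initRow S hS, ?_⟩
  intro o ho
  unfold pvInitRow
  rw [pv_getD_insertfold, if_pos ho]
  exact pv_keys_initBuckets

theorem pv_keys_modify_of_contains {κ ν : Type} [BEq κ] [LawfulBEq κ] (d : PySem.Dict κ ν)
    (k : κ) (d0 : ν) (f : ν → ν) (h : d.contains k = true) : (d.modify k d0 f).keys = d.keys := by
  rw [PySem.Dict.keys_modify, PySem.Dict.keys_insert_of_contains _ _ h]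

theorem pv_Nc_mem_K (m : List (Int × Int × String)) (c : Int × Int) (o : String) :
    pvNc m c o ∈ pvK := by
  unfold pvNc pvK
  rw [PySem.List.mem_pyRange_one]
  constructor
  · positivity
  · have h1 : (pvNeigh m c).count o ≤ (pvNeigh m c).length := List.count_le_length
    have h2 : (pvNeigh m c).length ≤ 6 := by
      unfold pvNeigh
      calc ((pvNeighbors c).filterMap (pvLookup m)).length ≤ (pvNeighbors c).length :=
            List.length_filterMap_le _ _
        _ = 6 := by simp [pvNeighbors, pvOffsets]
    omega

theorem pv_keysOK_modify3 (S : List String)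
    (cts : PySem.Dict String (PySem.Dict String (PySem.Dict Int Int)))
    (focal o : String) (k : Int) (hK : pvKeysOK S cts) (hf : focal ∈ S) (ho : o ∈ S) (hk : k ∈ pvK) :
    pvKeysOK S (cts.modify focal PySem.Dict.empty (fun row =>
      row.modify o PySem.Dict.empty (fun b => b.modify k 0 (· + 1)))) := by
  have hcf : cts.contains focal = true := by
    rw [PySem.Dict.contains_eq_decide_mem_keys, hK.1]; simp [hf]
  refine ⟨by rw [pv_keys_modify_of_contains _ _ _ _ hcf]; exact hK.1, ?_⟩
  intro sp hsp
  rw [PySem.Dict.getD_modify]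
  by_cases hspf : sp = focal
  · rw [if_pos hspf]
    obtain ⟨hrk, hbk⟩ := hK.2 focal hf
    have hco : (cts.getD focal PySem.Dict.empty).contains o = true := by
      rw [PySem.Dict.contains_eq_decide_mem_keys, hrk]; simp [ho]
    refine ⟨by rw [pv_keys_modify_of_contains _ _ _ _ hco]; exact hrk, ?_⟩
    intro o' ho'
    rw [PySem.Dict.getD_modify]
    by_cases hoo : o' = o
    · rw [if_pos hoo]
      have hck : ((cts.getD focal PySem.Dict.empty).getD o PySem.Dict.empty).contains k = true := by
        rw [PySem.Dict.contains_eq_decide_mem_keys, hbk o ho]; simp [hk]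
      rw [pv_keys_modify_of_contains _ _ _ _ hck]
      exact hbk o ho
    · rw [if_neg hoo]; exact hbk o' ho'
  · rw [if_neg hspf]; exact hK.2 sp hsp

theorem pv_keysOK_stepA (m : List (Int × Int × String)) (S : List String) (c : Int × Int)
    (cts : PySem.Dict String (PySem.Dict String (PySem.Dict Int Int)))
    (hK : pvKeysOK S cts) (hf : pvFocal m c ∈ S) :
    pvKeysOK S (pvStepA m S cts c) := by
  unfold pvStepA
  have : ∀ (L : List String), (∀ x ∈ L, x ∈ S) →
      ∀ cts, pvKeysOK S cts → pvKeysOK S (L.foldl (fun cts other =>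
        cts.modify ((pvLookup m c).getD "") PySem.Dict.empty (fun row =>
          row.modify other PySem.Dict.empty (fun b =>
            b.modify ((((pvNeighbors c).filterMap (pvLookup m)).count other : Int)) 0 (· + 1)))) cts) := by
    intro L
    induction L with
    | nil => intro _ cts h; exact h
    | cons a L ih =>
      intro hmem cts h
      simp only [List.foldl_cons]
      exact ih (fun x hx => hmem x (by simp [hx])) _
        (pv_keysOK_modify3 S cts _ a _ h hf (hmem a (by simp)) (pv_Nc_mem_K m c a))
  exact this S (fun x hx => hx) cts hK

theorem pv_keysOK_loopA (m : List (Int × Int × String)) (S : List String) (l : List (Int × Int))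
    (cts : PySem.Dict String (PySem.Dict String (PySem.Dict Int Int)))
    (hK : pvKeysOK S cts) (hpre : ∀ c ∈ l, pvFocal m c ∈ S) :
    pvKeysOK S (l.foldl (pvStepA m S) cts) := by
  induction l generalizing cts with
  | nil => exact hK
  | cons c l ih =>
    simp only [List.foldl_cons]
    exact ih _ (pv_keysOK_stepA m S c cts hK (hpre c (by simp))) (fun x hx => hpre x (by simp [hx]))

theorem pv_freq_eq (m : List (Int × Int × String)) (c : Int × Int) :
    pvFreq m c = PySem.Dict.counter (pvNeigh m c) := by
  unfold pvFreq pvNeigh pvNeighbors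
  rw [PySem.Dict.counter_eq_foldl, List.foldl_filterMap, List.foldl_map]
  congr 1
  funext f d
  cases pvLookup m (c.1 + d.1, c.2 + d.2) <;> rfl

theorem pv_bump_fold (S : List String)
    (focal : String) (P : List (String × Int)) (hnd : (P.map (·.1)).Nodup) :
    ∀ (cts : PySem.Dict String (PySem.Dict String (PySem.Dict Int Int))),
      (cts.getD focal PySem.Dict.empty).keys = S →
      ∀ (sp o : String) (k : Int),
      getV (P.foldl (fun cts p =>
        if (cts.getD focal PySem.Dict.empty).contains p.1 then
          cts.modify focal PySem.Dict.empty (fun row =>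
            row.modify p.1 PySem.Dict.empty (fun b => b.modify p.2 0 (· + 1)))
        else cts) cts) sp o k
      = getV cts sp o k + (if sp = focal ∧ o ∈ S ∧ (o, k) ∈ P then 1 else 0) := by
  induction P with
  | nil => intro cts _ sp o k; simp
  | cons p P ih =>
    intro cts hrk sp o k
    simp only [List.map_cons, List.nodup_cons] at hnd
    simp only [List.foldl_cons]
    by_cases hg : (cts.getD focal PySem.Dict.empty).contains p.1 = true
    · rw [if_pos hg]
      have hp1S : p.1 ∈ S := by
        rw [PySem.Dict.contains_eq_decide_mem_keys, hrk] at hg; exact of_decide_eq_true hg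
      have hrk' : ((cts.modify focal PySem.Dict.empty (fun row =>
          row.modify p.1 PySem.Dict.empty (fun b => b.modify p.2 0 (· + 1)))).getD focal
            PySem.Dict.empty).keys = S := by
        rw [PySem.Dict.getD_modify, if_pos rfl, pv_keys_modify_of_contains _ _ _ _ hg]
        exact hrk
      rw [ih hnd.2 _ hrk' sp o k]
      unfold getV
      rw [PySem.Dict.getD_modify]
      by_cases hsp : sp = focal
      · subst hsp
        rw [if_pos rfl, PySem.Dict.getD_modify]
        by_cases ho : o = p.1
        · subst ho
          rw [if_pos rfl]
          have hop : (p.1, k) ∉ P := fun hmem => hnd.1 (List.mem_map.mpr ⟨(p.1, k), hmem, rfl⟩)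
          by_cases hk : k = p.2
          · subst hk
            rw [PySem.Dict.getD_modify, if_pos rfl,
              if_neg (fun h => hop h.2.2),
              if_pos ⟨rfl, hp1S, List.mem_cons.mpr (Or.inl rfl)⟩]
            omega
          · rw [PySem.Dict.getD_modify, if_neg hk,
              if_neg (fun h => hop h.2.2),
              if_neg (fun h => by
                rcases List.mem_cons.mp h.2.2 with he | hm
                · exact hk (congrArg Prod.snd he)
                · exact hop hm)]
        · rw [if_neg ho]
          have hne : (o, k) ≠ p := fun he => ho (congrArg Prod.fst he)
          simp only [show ((o, k) ∈ p :: P) ↔ ((o, k) ∈ P) from by simp [List.mem_cons, hne]]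
      · rw [if_neg hsp, if_neg (fun h => hsp h.1), if_neg (fun h => hsp h.1)]
    · rw [if_neg hg]
      rw [ih hnd.2 _ hrk sp o k]
      congr 1
      have hp1S : p.1 ∉ S := by
        rw [PySem.Dict.contains_eq_decide_mem_keys, hrk] at hg
        simpa using hg
      by_cases ho : o = p.1
      · rw [if_neg (fun h => hp1S (ho ▸ h.2.1)), if_neg (fun h => hp1S (ho ▸ h.2.1))]
      · have hne : (o, k) ≠ p := fun he => ho (congrArg Prod.fst he)
        simp only [show ((o, k) ∈ p :: P) ↔ ((o, k) ∈ P) from by simp [List.mem_cons, hne]]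

theorem pv_freq_items (m : List (Int × Int × String)) (c : Int × Int) :
    (pvFreq m c).items = (PySem.Set.ofList (pvNeigh m c)).map (fun s => (s, (List.count s (pvNeigh m c) : Int))) := by
  rw [pv_freq_eq, PySem.Dict.items_counter]

theorem pv_getV_bumpCounts (m : List (Int × Int × String)) (S : List String) (c : Int × Int)
    (cts : PySem.Dict String (PySem.Dict String (PySem.Dict Int Int)))
    (hrk : (cts.getD (pvFocal m c) PySem.Dict.empty).keys = S) (sp o : String) (k : Int) :
    getV (pvBumpCounts m cts c) sp o k = getV cts sp o k +
      (if sp = pvFocal m c ∧ o ∈ S ∧ o ∈ pvNeigh m c ∧ k = pvNc m c o then 1 else 0) := by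
  unfold pvBumpCounts
  rw [pv_freq_items]
  show getV ((((PySem.Set.ofList (pvNeigh m c)).map (fun s => (s, (List.count s (pvNeigh m c) : Int)))).foldl (fun cts p =>
        if (cts.getD (pvFocal m c) PySem.Dict.empty).contains p.1 then
          cts.modify (pvFocal m c) PySem.Dict.empty (fun row =>
            row.modify p.1 PySem.Dict.empty (fun b => b.modify p.2 0 (· + 1)))
        else cts) cts)) sp o k = _
  have hnd : (((PySem.Set.ofList (pvNeigh m c)).map (fun s => (s, (List.count s (pvNeigh m c) : Int)))).map (·.1)).Nodup := by
    simp only [List.map_map, Function.comp_def, List.map_id']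
    exact PySem.Set.nodup_ofList (pvNeigh m c)
  rw [pv_bump_fold S (pvFocal m c) _ hnd cts hrk sp o k]
  congr 1
  have hmem : ((o, k) ∈ (PySem.Set.ofList (pvNeigh m c)).map (fun s => (s, (List.count s (pvNeigh m c) : Int))))
      ↔ (o ∈ pvNeigh m c ∧ k = pvNc m c o) := by
    rw [List.mem_map]
    constructor
    · rintro ⟨s, hs, he⟩
      obtain ⟨h1, h2⟩ := Prod.ext_iff.mp he
      subst h1
      exact ⟨(PySem.Set.mem_ofList _ _).mp hs, h2.symm⟩
    · rintro ⟨h1, h2⟩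
      exact ⟨o, (PySem.Set.mem_ofList _ _).mpr h1, Prod.ext_iff.mpr ⟨rfl, h2.symm⟩⟩
  simp only [hmem]

theorem pv_keysOK_bumpCounts (m : List (Int × Int × String)) (S : List String) (c : Int × Int)
    (cts : PySem.Dict String (PySem.Dict String (PySem.Dict Int Int)))
    (hK : pvKeysOK S cts) (hf : pvFocal m c ∈ S) :
    pvKeysOK S (pvBumpCounts m cts c) := by
  have hvals : ∀ p ∈ (pvFreq m c).items, p.2 ∈ pvK := by
    rw [pv_freq_items]
    rintro p hp
    rcases List.mem_map.mp hp with ⟨s, hs, rfl⟩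
    exact pv_Nc_mem_K m c s
  have main : ∀ (P : List (String × Int)), (∀ p ∈ P, p.2 ∈ pvK) →
      ∀ cts, pvKeysOK S cts → pvKeysOK S (P.foldl (fun cts p =>
        if (cts.getD ((pvLookup m c).getD "") PySem.Dict.empty).contains p.1 then
          cts.modify ((pvLookup m c).getD "") PySem.Dict.empty (fun row =>
            row.modify p.1 PySem.Dict.empty (fun b => b.modify p.2 0 (· + 1)))
        else cts) cts) := by
    intro P
    induction P with
    | nil => intro _ cts hK; exact hK
    | cons p P ih =>
      intro hv cts hKc
      simp only [List.foldl_cons]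
      have hv' : ∀ q ∈ P, q.2 ∈ pvK := fun q hq => hv q (List.mem_cons.mpr (Or.inr hq))
      by_cases hg : (cts.getD ((pvLookup m c).getD "") PySem.Dict.empty).contains p.1 = true
      · rw [if_pos hg]
        have hp1S : p.1 ∈ S := by
          rw [PySem.Dict.contains_eq_decide_mem_keys,
            show ((cts.getD ((pvLookup m c).getD "") PySem.Dict.empty).keys) = S from (hKc.2 _ hf).1] at hg
          exact of_decide_eq_true hg
        exact ih hv' _ (pv_keysOK_modify3 S cts _ p.1 p.2 hKc hf hp1S (hv p (List.mem_cons.mpr (Or.inl rfl))))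
      · rw [if_neg hg]
        exact ih hv' _ hKc
  exact main _ hvals cts hK

theorem pv_keysOK_loopB (m : List (Int × Int × String)) (S : List String) (l : List (Int × Int))
    (cts : PySem.Dict String (PySem.Dict String (PySem.Dict Int Int)))
    (hK : pvKeysOK S cts) (hpre : ∀ c ∈ l, pvFocal m c ∈ S) :
    pvKeysOK S (l.foldl (pvBumpCounts m) cts) := by
  induction l generalizing cts with
  | nil => exact hK
  | cons c l ih =>
    simp only [List.foldl_cons]
    exact ih _ (pv_keysOK_bumpCounts m S c cts hK (hpre c (by simp)))
      (fun x hx => hpre x (by simp [hx]))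

theorem pv_getV_loopB (m : List (Int × Int × String)) (S : List String) (l : List (Int × Int))
    (cts : PySem.Dict String (PySem.Dict String (PySem.Dict Int Int)))
    (hK : pvKeysOK S cts) (hpre : ∀ c ∈ l, pvFocal m c ∈ S) (sp o : String) (k : Int) :
    getV (l.foldl (pvBumpCounts m) cts) sp o k = getV cts sp o k +
      (l.countP (fun c => (pvFocal m c == sp) && (decide (o ∈ S)) &&
        (decide (o ∈ pvNeigh m c)) && (pvNc m c o == k)) : Int) := by
  induction l generalizing cts with
  | nil => simp
  | cons c l ih =>
    simp only [List.foldl_cons]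
    rw [ih _ (pv_keysOK_bumpCounts m S c cts hK (hpre c (by simp))) (fun x hx => hpre x (by simp [hx])),
      pv_getV_bumpCounts m S c cts (hK.2 _ (hpre c (by simp))).1 sp o k,
      List.countP_cons]
    by_cases hcond : sp = pvFocal m c ∧ o ∈ S ∧ o ∈ pvNeigh m c ∧ k = pvNc m c o
    · rw [if_pos hcond, if_pos (by simp [beq_iff_eq]; exact ⟨⟨⟨hcond.1.symm, hcond.2.1⟩, hcond.2.2.1⟩, hcond.2.2.2.symm⟩)]
      push_cast; ring
    · rw [if_neg hcond, if_neg (by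
        simp only [Bool.and_eq_true, beq_iff_eq, decide_eq_true_eq]
        rintro ⟨⟨⟨h1, h2⟩, h3⟩, h4⟩
        exact hcond ⟨h1.symm, h2, h3, h4.symm⟩)]
      push_cast; ring

theorem pv_getD_totals (m : List (Int × Int × String)) (S : List String) (l : List (Int × Int)) (sp : String) :
    (l.foldl (pvBumpTotals m) (pvInitTotals S)).getD sp 0 =
      (l.countP (fun c => pvFocal m c == sp) : Int) := by
  have h0 : (pvInitTotals S).getD sp 0 = 0 := by
    unfold pvInitTotals
    rw [pv_getD_insertfold]
    split_ifs <;> simp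
  have hshape : l.foldl (pvBumpTotals m) (pvInitTotals S) =
      (l.map (pvFocal m)).foldl (fun d x => d.modify x 0 (· + 1)) (pvInitTotals S) := by
    rw [List.foldl_map]; rfl
  rw [hshape, PySem.Dict.getD_foldl_modify_add_one, h0, zero_add]
  congr 1
  unfold List.count
  rw [List.countP_map]
  rfl

def pvFinB (t : PySem.Dict String Int) (sp : String) (_ : String) (b : PySem.Dict Int Int) : PySem.Dict Int Int :=
  b.insert 0 (t.getD sp 0 - ((PySem.List.pyRange 1 7 1).map (fun k => b.getD k 0)).sum)

def pvFinG (t : PySem.Dict String Int) (sp : String)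
    (row : PySem.Dict String (PySem.Dict Int Int)) : PySem.Dict String (PySem.Dict Int Int) :=
  row.items.foldl (fun r q => r.modify q.1 PySem.Dict.empty (pvFinB t sp q.1)) row

theorem pv_finalize_eq (t : PySem.Dict String Int)
    (cts : PySem.Dict String (PySem.Dict String (PySem.Dict Int Int))) :
    pvFinalize t cts = cts.items.foldl (fun c2 p => c2.modify p.1 PySem.Dict.empty (pvFinG t p.1)) cts := rfl

theorem pv_getV_finalize (S : List String) (t : PySem.Dict String Int)
    (cts : PySem.Dict String (PySem.Dict String (PySem.Dict Int Int)))
    (hS : S.Nodup) (hK : pvKeysOK S cts) (sp o : String) (k : Int) :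
    getV (pvFinalize t cts) sp o k =
      if sp ∈ S ∧ o ∈ S ∧ k = 0 then
        t.getD sp 0 - ((PySem.List.pyRange 1 7 1).map (fun j => getV cts sp o j)).sum
      else getV cts sp o k := by
  have hkeys : cts.items.map (·.1) = S := hK.1
  have hnd : (cts.items.map (·.1)).Nodup := by rw [hkeys]; exact hS
  unfold getV
  rw [pv_finalize_eq, pv_visit_once cts.items hnd (pvFinG t) PySem.Dict.empty cts cts (fun x _ => rfl) sp,
    hkeys]
  by_cases hsp : sp ∈ S
  · rw [if_pos hsp]
    have hrow := hK.2 sp hsp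
    have hrnd : ((cts.getD sp PySem.Dict.empty).items.map (·.1)).Nodup := by
      have : (cts.getD sp PySem.Dict.empty).items.map (·.1) = S := hrow.1
      rw [this]; exact hS
    unfold pvFinG
    rw [pv_visit_once _ hrnd (pvFinB t sp) PySem.Dict.empty _ _ (fun x _ => rfl) o,
      show (cts.getD sp PySem.Dict.empty).items.map (·.1) = S from hrow.1]
    by_cases ho : o ∈ S
    · rw [if_pos ho]
      unfold pvFinB
      rw [PySem.Dict.getD_insert]
      by_cases hk : k = 0
      · rw [if_pos hk, if_pos ⟨hsp, ho, hk⟩]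
      · rw [if_neg hk, if_neg (fun h => hk h.2.2)]
    · rw [if_neg ho, if_neg (fun h => ho h.2.1)]
  · rw [if_neg hsp, if_neg (fun h => hsp h.1)]

theorem pv_keysOK_finalize (S : List String) (t : PySem.Dict String Int)
    (cts : PySem.Dict String (PySem.Dict String (PySem.Dict Int Int)))
    (hK : pvKeysOK S cts) :
    pvKeysOK S (pvFinalize t cts) := by
  rw [pv_finalize_eq]
  have hsub : ∀ p ∈ cts.items, p.1 ∈ S := by
    intro p hp
    have : p.1 ∈ cts.keys := List.mem_map.mpr ⟨p, hp, rfl⟩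
    rwa [hK.1] at this
  have hrowfin : ∀ (sp' : String) (row : PySem.Dict String (PySem.Dict Int Int)),
      (row.keys = S ∧ ∀ o ∈ S, (row.getD o PySem.Dict.empty).keys = pvK) →
      ((pvFinG t sp' row).keys = S ∧ ∀ o ∈ S, ((pvFinG t sp' row).getD o PySem.Dict.empty).keys = pvK) := by
    intro sp' row hrow
    unfold pvFinG
    have hsubr : ∀ q ∈ row.items, q.1 ∈ S := by
      intro q hq
      have : q.1 ∈ row.keys := List.mem_map.mpr ⟨q, hq, rfl⟩
      rwa [hrow.1] at this
    have main : ∀ (Q : List (String × PySem.Dict Int Int)), (∀ q ∈ Q, q.1 ∈ S) →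
        ∀ r : PySem.Dict String (PySem.Dict Int Int),
        (r.keys = S ∧ ∀ o ∈ S, (r.getD o PySem.Dict.empty).keys = pvK) →
        ((Q.foldl (fun r q => r.modify q.1 PySem.Dict.empty (pvFinB t sp' q.1)) r).keys = S ∧
          ∀ o ∈ S, ((Q.foldl (fun r q => r.modify q.1 PySem.Dict.empty (pvFinB t sp' q.1)) r).getD o PySem.Dict.empty).keys = pvK) := by
      intro Q
      induction Q with
      | nil => intro _ r h; exact h
      | cons q Q ih =>
        intro hq r hr
        simp only [List.foldl_cons]
        refine ih (fun x hx => hq x (List.mem_cons.mpr (Or.inr hx))) _ ⟨?_, ?_⟩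
        · have hcq : r.contains q.1 = true := by
            rw [PySem.Dict.contains_eq_decide_mem_keys, hr.1]
            simp [hq q (List.mem_cons.mpr (Or.inl rfl))]
          rw [pv_keys_modify_of_contains _ _ _ _ hcq]
          exact hr.1
        · intro o ho
          rw [PySem.Dict.getD_modify]
          by_cases hoq : o = q.1
          · rw [if_pos hoq]
            unfold pvFinB
            have hc0 : (r.getD q.1 PySem.Dict.empty).contains 0 = true := by
              rw [PySem.Dict.contains_eq_decide_mem_keys, hr.2 q.1 (hq q (List.mem_cons.mpr (Or.inl rfl)))]
              decide
            rw [PySem.Dict.keys_insert_of_contains _ _ hc0]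
            exact hr.2 q.1 (hq q (List.mem_cons.mpr (Or.inl rfl)))
          · rw [if_neg hoq]
            exact hr.2 o ho
    exact main _ hsubr row hrow
  have mainO : ∀ (Q : List (String × PySem.Dict String (PySem.Dict Int Int))), (∀ p ∈ Q, p.1 ∈ S) →
      ∀ c2, pvKeysOK S c2 →
      pvKeysOK S (Q.foldl (fun c2 p => c2.modify p.1 PySem.Dict.empty (pvFinG t p.1)) c2) := by
    intro Q
    induction Q with
    | nil => intro _ c2 h; exact h
    | cons p Q ih =>
      intro hq c2 h2
      simp only [List.foldl_cons]
      refine ih (fun x hx => hq x (List.mem_cons.mpr (Or.inr hx))) _ ⟨?_, ?_⟩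
      · have hcp : c2.contains p.1 = true := by
          rw [PySem.Dict.contains_eq_decide_mem_keys, h2.1]
          simp [hq p (List.mem_cons.mpr (Or.inl rfl))]
        rw [pv_keys_modify_of_contains _ _ _ _ hcp]
        exact h2.1
      · intro sp hsp
        rw [PySem.Dict.getD_modify]
        by_cases hspp : sp = p.1
        · rw [if_pos hspp]
          exact hrowfin p.1 _ (h2.2 p.1 (hq p (List.mem_cons.mpr (Or.inl rfl))))
        · rw [if_neg hspp]
          exact h2.2 sp hsp
  exact mainO _ hsub cts hK

theorem pv_cast_sum (K : List Int) (f : Int → Nat) :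
    (((K.map f).sum : Nat) : Int) = (K.map (fun k => ((f k : Nat) : Int))).sum := by
  induction K with
  | nil => simp
  | cons k K _ =>
    simp only [List.map_cons, List.sum_cons]
    push_cast
    simp [List.map_map, Function.comp_def]

theorem pv_out_eq (S : List String) (cts : PySem.Dict String (PySem.Dict String (PySem.Dict Int Int)))
    (hS : S.Nodup) (hK : pvKeysOK S cts) :
    cts.items.map (fun p => (p.1, p.2.items.map (fun q => (q.1, q.2.items)))) =
      S.map (fun sp => (sp, S.map (fun o => (o, pvK.map (fun k => (k, getV cts sp o k)))))) := by
  have hndO : cts.keys.Nodup := by rw [hK.1]; exact hS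
  rw [PySem.Dict.items_eq_map_keys cts hndO PySem.Dict.empty, hK.1, List.map_map]
  apply List.map_congr_left
  intro sp hsp
  simp only [Function.comp_def]
  congr 1
  have hrow := hK.2 sp hsp
  have hndR : (cts.getD sp PySem.Dict.empty).keys.Nodup := by rw [hrow.1]; exact hS
  rw [PySem.Dict.items_eq_map_keys _ hndR PySem.Dict.empty, hrow.1, List.map_map]
  apply List.map_congr_left
  intro o ho
  simp only [Function.comp_def]
  congr 1
  have hndB : ((cts.getD sp PySem.Dict.empty).getD o PySem.Dict.empty).keys.Nodup := by
    rw [hrow.2 o ho]; exact PySem.List.nodup_pyRange_one 0 7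
  rw [PySem.Dict.items_eq_map_keys _ hndB 0, hrow.2 o ho]
  rfl

theorem pv_keysOK_init' (S : List String) : pvKeysOK (PySem.Set.ofList S) (pvInitCounts S) := by
  constructor
  · unfold pvInitCounts
    rw [PySem.Dict.keys_foldl_insert, PySem.Dict.keys_empty, PySem.Set.ofList_eq_foldl]
    rfl
  · intro sp hsp
    have hspS : sp ∈ S := (PySem.Set.mem_ofList S sp).mp hsp
    unfold pvInitCounts
    rw [pv_getD_insertfold, if_pos hspS]
    constructor
    · unfold pvInitRow
      rw [PySem.Dict.keys_foldl_insert, PySem.Dict.keys_empty, PySem.Set.ofList_eq_foldl]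
      rfl
    · intro o ho
      unfold pvInitRow
      rw [pv_getD_insertfold, if_pos ((PySem.Set.mem_ofList S o).mp ho)]
      exact pv_keys_initBuckets

theorem pv_getD_initTotals (S : List String) (sp : String) : (pvInitTotals S).getD sp 0 = 0 := by
  unfold pvInitTotals
  rw [pv_getD_insertfold]
  split_ifs <;> simp

theorem pv_empty_case (m : List (Int × Int × String)) (S : List String) :
    compute_adjacency [] m S = compute_adjacency_alt [] m S := by
  unfold compute_adjacency compute_adjacency_alt
  simp only [List.foldl_nil]
  have hS0 := PySem.Set.nodup_ofList S
  have hK0 := pv_keysOK_init' S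
  have hKF := pv_keysOK_finalize (PySem.Set.ofList S) (pvInitTotals S) _ hK0
  rw [pv_out_eq _ _ hS0 hK0, pv_out_eq _ _ hS0 hKF]
  apply List.map_congr_left
  intro sp hsp
  congr 1
  apply List.map_congr_left
  intro o ho
  congr 1
  apply List.map_congr_left
  intro k _
  congr 1
  rw [pv_getV_finalize _ _ _ hS0 hK0, pv_getV_init]
  split_ifs with h
  · rw [pv_getD_initTotals]
    simp [pv_getV_init]
  · rfl

theorem compute_adjacency_spec' : ∀ (inner_coords : List (Int × Int)) (species_map : List (Int × Int × String)) (species_list : List String),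
    ((inner_coords = [] ∨ species_list.Nodup) ∧
      ∀ c ∈ inner_coords, ∃ sp ∈ species_list, pvLookup species_map c = some sp) →
    compute_adjacency inner_coords species_map species_list = compute_adjacency_alt inner_coords species_map species_list := by
  intro inner m S hpre
  obtain ⟨hS0, hpre2⟩ := hpre
  rcases hS0 with hemp | hS
  · subst hemp
    exact pv_empty_case m S
  have hfoc : ∀ c ∈ inner, pvFocal m c ∈ S := by
    intro c hc
    obtain ⟨sp, hspS, heq⟩ := hpre2 c hc
    unfold pvFocal
    rw [heq]
    exact hspS
  have hsplit : inner.foldl (pvStepB m) (pvInitCounts S, pvInitTotals S) =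
      (inner.foldl (pvBumpCounts m) (pvInitCounts S), inner.foldl (pvBumpTotals m) (pvInitTotals S)) := by
    rw [show pvStepB m = (fun st c => (pvBumpCounts m st.1 c, pvBumpTotals m st.2 c)) from rfl]
    exact PySem.List.foldl_prod_mk (pvBumpCounts m) (pvBumpTotals m) inner _ _
  have hBalt : compute_adjacency_alt inner m S =
      (pvFinalize (inner.foldl (pvBumpTotals m) (pvInitTotals S))
        (inner.foldl (pvBumpCounts m) (pvInitCounts S))).items.map
          (fun p => (p.1, p.2.items.map (fun q => (q.1, q.2.items)))) := by
    unfold compute_adjacency_alt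
    show (pvFinalize (inner.foldl (pvStepB m) (pvInitCounts S, pvInitTotals S)).2
        ((inner.foldl (pvStepB m) (pvInitCounts S, pvInitTotals S)).1)).items.map
          (fun p => (p.1, p.2.items.map (fun q => (q.1, q.2.items)))) = _
    rw [hsplit]
  have hKA := pv_keysOK_loopA m S inner _ (pv_keysOK_init S hS) hfoc
  have hKB := pv_keysOK_loopB m S inner _ (pv_keysOK_init S hS) hfoc
  have hKBF := pv_keysOK_finalize S (inner.foldl (pvBumpTotals m) (pvInitTotals S)) _ hKB
  unfold compute_adjacency
  rw [hBalt, pv_out_eq S _ hS hKA, pv_out_eq S _ hS hKBF]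
  apply List.map_congr_left
  intro sp hsp
  congr 1
  apply List.map_congr_left
  intro o ho
  congr 1
  apply List.map_congr_left
  intro k hk
  congr 1
  -- value-level goal
  have hA : getV (inner.foldl (pvStepA m S) (pvInitCounts S)) sp o k = pvN m inner sp o k := by
    rw [pv_getV_loopA, pv_getV_init, List.count_eq_one_of_mem hS ho]
    push_cast
    ring
  have hBloop : ∀ j : Int, getV (inner.foldl (pvBumpCounts m) (pvInitCounts S)) sp o j
      = (inner.countP (fun c => (pvFocal m c == sp) && (decide (o ∈ S)) &&
          (decide (o ∈ pvNeigh m c)) && (pvNc m c o == j)) : Int) := by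
    intro j
    rw [pv_getV_loopB m S inner _ (pv_keysOK_init S hS) hfoc, pv_getV_init]
    ring
  have hBpred : ∀ j : Int, j ≠ 0 →
      (inner.countP (fun c => (pvFocal m c == sp) && (decide (o ∈ S)) &&
        (decide (o ∈ pvNeigh m c)) && (pvNc m c o == j)))
      = inner.countP (fun c => pvFocal m c == sp && pvNc m c o == j) := by
    intro j hj
    apply List.countP_congr
    intro c _
    simp only [Bool.and_eq_true, beq_iff_eq, decide_eq_true_eq]
    constructor
    · rintro ⟨⟨⟨h1, _⟩, _⟩, h4⟩
      exact ⟨h1, h4⟩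
    · rintro ⟨h1, h4⟩
      refine ⟨⟨⟨h1, ho⟩, ?_⟩, h4⟩
      have : 0 < List.count o (pvNeigh m c) := by
        unfold pvNc at h4
        omega
      exact List.count_pos_iff.mp this
  rw [hA, pv_getV_finalize S _ _ hS hKB]
  by_cases hk0 : k = 0
  · rw [if_pos ⟨hsp, ho, hk0⟩, pv_getD_totals]
    subst hk0
    have hmapsum : (PySem.List.pyRange 1 7 1).map (fun j => getV (inner.foldl (pvBumpCounts m) (pvInitCounts S)) sp o j)
        = (PySem.List.pyRange 1 7 1).map (fun j => pvN m inner sp o j) := by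
      apply List.map_congr_left
      intro j hj
      have hj0 : j ≠ 0 := by
        have := PySem.List.mem_pyRange_one.mp hj
        omega
      rw [hBloop j, hBpred j hj0]
      rfl
    rw [hmapsum]
    have hpart := pv_countP_partition inner (fun c => pvFocal m c == sp) (fun c => pvNc m c o) pvK
      (show pvK.Nodup from PySem.List.nodup_pyRange_one 0 7) (fun c _ => pv_Nc_mem_K m c o)
    have hpartInt : (inner.countP (fun c => pvFocal m c == sp) : Int)
        = (pvK.map (fun j => pvN m inner sp o j)).sum := by
      rw [congrArg (fun n : Nat => (n : Int)) hpart, pv_cast_sum]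
      rfl
    have hcons : pvK = 0 :: PySem.List.pyRange 1 7 1 := by decide
    rw [hcons] at hpartInt
    simp only [List.map_cons, List.sum_cons] at hpartInt
    omega
  · rw [if_neg (fun h => hk0 h.2.2), hBloop k, hBpred k hk0]
    rfl

-- ===== VERDICT (by name: the statement is the Claim_ definition above) =====
theorem compute_adjacency_spec : Claim_equal_compute_adjacency := by
  intro inner_coords species_map species_list _hdom hpre
  unfold Spec_compute_adjacency
  exact compute_adjacency_spec' inner_coords species_map species_list hpre
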